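-- pv_equiv track=rewrite | github.com/yousef000/natural-langauge-processing | language-modeling-and-smoothing/language-modeling-and-smoothing.py | get_tri_count
-- ===== SOURCE A (Python) =====
-- def get_tri_count(data, freqs):
--     # compute the count of trigram C(x,y,z)
--     trigram_count = {}
--     for sentence in data:
--         words = sentence.split()
--         for i in range(len(words)):
--             # if word is unknown then change token to UNK
--             if words[i] not in freqs:
--                 words[i] = "UNK"
--             if i != len(words)-1 and words[i+1] not in freqs:
--                 words[i+1] = "UNK"
--             if i != len(words)-2 and i != len(words)-1 and words[i+2] not in freqs:
--                 words[i+2] = "UNK"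
--
--             # if last word
--             if i == len(words)-1:
--                 break
--             if i == len(words)-2:
--                 if (words[i], words[i+1], "<STOP>") in trigram_count:
--                     trigram_count[(words[i], words[i+1], "<STOP>")] += 1
--                 else:
--                     trigram_count[(words[i], words[i+1], "<STOP>")] = 1
--             elif (words[i], words[i+1], words[i+2]) in trigram_count:
--                 trigram_count[(words[i], words[i+1], words[i+2])] += 1
--             else:
--                 trigram_count[(words[i], words[i+1], words[i+2])] = 1
--     return trigram_count
-- ===== SOURCE B (Python) =====
-- def get_tri_count(data, freqs):
--     # recursively enumerate the trigrams of one sentence, normalizing unknown words on the fly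
--     def tris(ws):
--         if len(ws) < 2:
--             return []
--         a = ws[0] if ws[0] in freqs else "UNK"
--         b = ws[1] if ws[1] in freqs else "UNK"
--         if len(ws) == 2:
--             return [(a, b, "<STOP>")]
--         c = ws[2] if ws[2] in freqs else "UNK"
--         return [(a, b, c)] + tris(ws[1:])
--     stream = [t for sentence in data for t in tris(sentence.split())]
--     # dict comprehension: first-occurrence key order, value = total multiplicity in the stream
--     return {t: stream.count(t) for t in stream}
-- ===== Notes on version B (the rewrite author's own statement) =====
-- stated objective: alternative
-- what changed: Replaces A's single streaming pass (index loop with look-ahead in-place UNK mutation, last/second-to-last branches, and an incrementally mutated count dict) by two staged passes: a structural recursion that enumerates each sentence's normalized, STOP-terminated trigrams into one flat stream, then a dict comprehension {t: stream.count(t) for t in stream} that builds the result with no accumulator at all.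
import Mathlib
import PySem

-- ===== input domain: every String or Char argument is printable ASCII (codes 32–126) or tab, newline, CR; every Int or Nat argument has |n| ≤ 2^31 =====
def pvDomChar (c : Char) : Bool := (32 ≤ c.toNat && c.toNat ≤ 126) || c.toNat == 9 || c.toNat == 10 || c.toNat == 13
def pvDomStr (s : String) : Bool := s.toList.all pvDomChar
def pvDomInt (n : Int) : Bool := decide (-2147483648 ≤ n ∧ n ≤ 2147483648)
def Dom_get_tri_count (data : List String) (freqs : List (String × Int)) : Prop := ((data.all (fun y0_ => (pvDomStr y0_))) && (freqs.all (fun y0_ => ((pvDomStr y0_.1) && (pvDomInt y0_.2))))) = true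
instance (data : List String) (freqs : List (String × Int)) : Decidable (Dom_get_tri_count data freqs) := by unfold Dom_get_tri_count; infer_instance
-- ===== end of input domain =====

-- B replaces A's streaming index loop with in-place look-ahead mutation and an incrementally
-- mutated count dict by two staged passes: a structural recursion enumerating each sentence's
-- normalized STOP-terminated trigrams into one flat stream, then a dict comprehension keyed by
-- stream.count with no accumulator (alternative decomposition, not claimed faster).


-- ===== PORT A =====
-- flatten ((x,y,z), n) items to the declared return shape (shared output conversion)
def itemsFlat (tc : PySem.Dict (String × String × String) Int) : List (String × String × String × Int) :=
  tc.items.map (fun p => (p.1.1, p.1.2.1, p.1.2.2, p.2))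

-- A's inner 'for i in range(len(words))' with in-place mutation and break; fuel (initially
-- len(words), one unit per loop iteration) only makes the recursion structural; getD is exact:
-- every read index is in range when read (the guards mirror Python's, written over Int like Python's len-1/len-2)
def triLoop (freqs : List (String × Int)) (fuel : Nat) (ws : List String) (i : Nat)
    (tc : PySem.Dict (String × String × String) Int) : PySem.Dict (String × String × String) Int :=
  match fuel with
  | 0 => tc
  | fuel + 1 =>
    if i < ws.length then
      let n : Int := (ws.length : Int)
      let ws1 := if ¬ (PySem.Dict.mk freqs).contains (ws.getD i "") then ws.set i "UNK" else ws
      let ws2 := if (i : Int) ≠ n - 1 ∧ ¬ (PySem.Dict.mk freqs).contains (ws1.getD (i+1) "") then ws1.set (i+1) "UNK" else ws1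
      let ws3 := if (i : Int) ≠ n - 2 ∧ (i : Int) ≠ n - 1 ∧ ¬ (PySem.Dict.mk freqs).contains (ws2.getD (i+2) "") then ws2.set (i+2) "UNK" else ws2
      if (i : Int) = n - 1 then tc
      else
        let key := if (i : Int) = n - 2 then (ws3.getD i "", ws3.getD (i+1) "", "<STOP>")
                   else (ws3.getD i "", ws3.getD (i+1) "", ws3.getD (i+2) "")
        let tc' := if (tc.get? key).isSome then tc.insert key (tc.getD key 0 + 1) else tc.insert key 1
        triLoop freqs fuel ws3 (i+1) tc'
    else tc

def get_tri_count (data : List String) (freqs : List (String × Int)) : List (String × String × String × Int) :=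
  itemsFlat (data.foldl (fun tc sentence =>
    triLoop freqs (PySem.Str.split₀ sentence).length (PySem.Str.split₀ sentence) 0 tc) PySem.Dict.empty)

-- ===== PORT B =====
-- 'w if w in freqs else "UNK"'
def normWord (freqs : List (String × Int)) (w : String) : String :=
  if (PySem.Dict.mk freqs).contains w then w else "UNK"

-- B's recursive helper 'tris(ws)': the len<2 / len==2 / longer cases of the Python recursion
def trisB (freqs : List (String × Int)) : List String → List (String × String × String)
  | [] => []
  | [_] => []
  | [a, b] => [(normWord freqs a, normWord freqs b, "<STOP>")]
  | a :: b :: c :: rest =>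
      (normWord freqs a, normWord freqs b, normWord freqs c) :: trisB freqs (b :: c :: rest)

-- 'stream = [t for sentence in data for t in tris(sentence.split())]' then the dict
-- comprehension '{t: stream.count(t) for t in stream}' (insert overwrites in place, as Python)
def get_tri_count_alt (data : List String) (freqs : List (String × Int)) : List (String × String × String × Int) :=
  let stream := data.flatMap (fun sentence => trisB freqs (PySem.Str.split₀ sentence))
  itemsFlat (stream.foldl (fun d t => d.insert t ((stream.count t : Int))) PySem.Dict.empty)

-- ===== PRECONDITION & SPEC =====
def Spec_get_tri_count (data : List String) (freqs : List (String × Int)) (out : List (String × String × String × Int)) : Prop := out = get_tri_count_alt data freqs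
instance (data : List String) (freqs : List (String × Int)) (out : List (String × String × String × Int)) : Decidable (Spec_get_tri_count data freqs out) := by unfold Spec_get_tri_count; infer_instance

-- ===== CLAIM (what is proved, stated in full; the proofs are below) =====
def Claim_equal_get_tri_count : Prop := ∀ (data : List String) (freqs : List (String × Int)), Dom_get_tri_count data freqs → Spec_get_tri_count data freqs (get_tri_count data freqs)

-- ===== LEMMAS AND PROOFS =====

-- the accumulator step of a counting loop (proof-side abbreviation; used to characterize A's loop)
def countTri (counts : PySem.Dict (String × String × String) Int) (t : String × String × String) :
    PySem.Dict (String × String × String) Int :=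
  counts.insert t (counts.getD t 0 + 1)

-- the suffix of the sliding-window triple list starting at index i
def trisFrom (l : List String) (i : Nat) : List (String × String × String) :=
  List.zipWith3 (fun a b c => (a, b, c)) (l.drop i) (l.drop (i + 1)) (l.drop (i + 2))

-- the unconditional form of one of A's conditional normalizing writes
def setNorm (freqs : List (String × Int)) (ws : List String) (j : Nat) : List String :=
  ws.set j (normWord freqs (ws.getD j ""))

lemma zipWith3_nil_third (f : String → String → String → String × String × String)
    (as bs : List String) : List.zipWith3 f as bs [] = [] := by
  cases as <;> cases bs <;> rfl

lemma trisFrom_eq_nil (l : List String) (i : Nat) (h : l.length ≤ i + 2) :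
    trisFrom l i = [] := by
  unfold trisFrom
  rw [List.drop_eq_nil_of_le h, zipWith3_nil_third]

lemma trisFrom_cons (l : List String) (i : Nat) (h : i + 2 < l.length) :
    trisFrom l i = (l[i], l[i + 1], l[i + 2]) :: trisFrom l (i + 1) := by
  unfold trisFrom
  rw [List.drop_eq_getElem_cons (by omega : i < l.length),
      List.drop_eq_getElem_cons (by omega : i + 1 < l.length),
      List.drop_eq_getElem_cons (by omega : i + 2 < l.length)]
  rfl

lemma trisFrom_cons' (l : List String) (i : Nat) (h : i + 2 < l.length) :
    trisFrom l i = (l.getD i "", l.getD (i + 1) "", l.getD (i + 2) "") :: trisFrom l (i + 1) := by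
  rw [trisFrom_cons l i h]
  simp [List.getD, List.getElem?_eq_getElem (show i < l.length by omega),
        List.getElem?_eq_getElem (show i + 1 < l.length by omega), List.getElem?_eq_getElem h]

lemma normWord_idem (freqs : List (String × Int)) (w : String) :
    normWord freqs (normWord freqs w) = normWord freqs w := by
  unfold normWord; split_ifs with h1 h2 <;> simp_all

lemma getD_eq_getElem (ws : List String) (j : Nat) (h : j < ws.length) :
    ws.getD j "" = ws[j] := by
  simp [List.getD, List.getElem?_eq_getElem h]

lemma getD_set_ne' (ws : List String) (j j' : Nat) (v : String) (h : j' ≠ j) :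
    (ws.set j v).getD j' "" = ws.getD j' "" := by
  simp only [List.getD, List.getElem?_set_ne (by omega : j ≠ j')]

lemma getD_set_self' (ws : List String) (j : Nat) (v : String) (h : j < ws.length) :
    (ws.set j v).getD j "" = v := by
  simp [List.getD, h]

lemma map_norm_setNorm (freqs : List (String × Int)) (ws : List String) (j : Nat) :
    (setNorm freqs ws j).map (normWord freqs) = ws.map (normWord freqs) := by
  unfold setNorm
  by_cases hj : j < ws.length
  · rw [List.map_set, getD_eq_getElem ws j hj, normWord_idem,
        ← List.getElem_map (f := normWord freqs) (h := by simpa using hj),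
        List.set_getElem_self]
  · rw [List.set_eq_of_length_le (by omega)]

lemma length_setNorm (freqs : List (String × Int)) (ws : List String) (j : Nat) :
    (setNorm freqs ws j).length = ws.length := by
  unfold setNorm; simp

lemma getD_setNorm_ne (freqs : List (String × Int)) (ws : List String) (j j' : Nat) (h : j' ≠ j) :
    (setNorm freqs ws j).getD j' "" = ws.getD j' "" := by
  unfold setNorm; exact getD_set_ne' ws j j' _ h

lemma getD_setNorm_self (freqs : List (String × Int)) (ws : List String) (j : Nat) (h : j < ws.length) :
    (setNorm freqs ws j).getD j "" = normWord freqs (ws.getD j "") := by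
  unfold setNorm; exact getD_set_self' ws j _ h

-- each of A's guarded in-place writes is the unconditional normalizing write
lemma condSet_eq (freqs : List (String × Int)) (ws : List String) (j : Nat)
    (c : Prop) [Decidable c] (hc : c ↔ j < ws.length) :
    (if c ∧ ¬ (PySem.Dict.mk freqs).contains (ws.getD j "") then ws.set j "UNK" else ws)
      = setNorm freqs ws j := by
  unfold setNorm normWord
  by_cases hj : j < ws.length
  · have hcv : c := hc.mpr hj
    by_cases hK : (PySem.Dict.mk freqs).contains (ws.getD j "") = true
    · rw [if_neg (by tauto), if_pos hK, getD_eq_getElem ws j hj, List.set_getElem_self]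
    · rw [if_pos ⟨hcv, hK⟩, if_neg hK]
  · rw [if_neg (fun hx => hj (hc.mp hx.1)), List.set_eq_of_length_le (by omega)]

lemma condSet_eq_first (freqs : List (String × Int)) (ws : List String) (j : Nat) (hj : j < ws.length) :
    (if ¬ (PySem.Dict.mk freqs).contains (ws.getD j "") then ws.set j "UNK" else ws)
      = setNorm freqs ws j := by
  unfold setNorm normWord
  by_cases hK : (PySem.Dict.mk freqs).contains (ws.getD j "") = true
  · rw [if_neg (fun hc => hc hK), if_pos hK, getD_eq_getElem ws j hj, List.set_getElem_self]
  · rw [if_pos hK, if_neg hK]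

-- the third write's guard is a three-way conjunction
lemma condSet_eq2 (freqs : List (String × Int)) (ws : List String) (j : Nat)
    (c1 c2 : Prop) [Decidable c1] [Decidable c2] (hc : (c1 ∧ c2) ↔ j < ws.length) :
    (if c1 ∧ c2 ∧ ¬ (PySem.Dict.mk freqs).contains (ws.getD j "") then ws.set j "UNK" else ws)
      = setNorm freqs ws j := by
  unfold setNorm normWord
  by_cases hj : j < ws.length
  · have hcv := hc.mpr hj
    by_cases hK : (PySem.Dict.mk freqs).contains (ws.getD j "") = true
    · rw [if_neg (by tauto), if_pos hK, getD_eq_getElem ws j hj, List.set_getElem_self]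
    · rw [if_pos ⟨hcv.1, hcv.2, hK⟩, if_neg hK]
  · rw [if_neg (fun hx => hj (hc.mp ⟨hx.1, hx.2.1⟩)), List.set_eq_of_length_le (by omega)]

lemma count_branch (tc : PySem.Dict (String × String × String) Int) (key : String × String × String) :
    (if (tc.get? key).isSome then tc.insert key (tc.getD key 0 + 1) else tc.insert key 1)
      = countTri tc key := by
  unfold countTri
  cases hg : tc.get? key with
  | some v => rw [if_pos (by rfl)]
  | none =>
      rw [if_neg (by simp)]
      rw [PySem.Dict.getD_eq_get?_getD, hg]
      simp

lemma triLoop_eq_trisFrom (freqs : List (String × Int)) (nws0 : List String) :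
    ∀ (fuel : Nat) (ws : List String) (i : Nat) (tc : PySem.Dict (String × String × String) Int),
      ws.length - i ≤ fuel → ws.map (normWord freqs) = nws0 →
      triLoop freqs fuel ws i tc = (trisFrom (nws0 ++ ["<STOP>"]) i).foldl countTri tc := by
  intro fuel
  induction fuel with
  | zero =>
      intro ws i tc hk hn
      have hlen : nws0.length = ws.length := by rw [← hn]; simp
      rw [trisFrom_eq_nil _ _ (by simp [hlen]; omega)]
      rfl
  | succ k ih =>
      intro ws i tc hk hn
      by_cases h : i < ws.length
      · rw [triLoop, if_pos h]
        have hlen : nws0.length = ws.length := by rw [← hn]; simp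
        have e1 := condSet_eq_first freqs ws i h
        have e2 := condSet_eq freqs (setNorm freqs ws i) (i+1)
          ((i:Int) ≠ (ws.length:Int) - 1) (by rw [length_setNorm]; omega)
        have e3 := condSet_eq2 freqs (setNorm freqs (setNorm freqs ws i) (i+1)) (i+2)
          ((i:Int) ≠ (ws.length:Int) - 2) ((i:Int) ≠ (ws.length:Int) - 1)
          (by rw [length_setNorm, length_setNorm]; omega)
        simp only [e1, e2, e3, count_branch]
        by_cases hbr : (i : Int) = (ws.length : Int) - 1
        · rw [if_pos hbr, trisFrom_eq_nil _ _ (by simp [hlen]; omega)]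
          rfl
        · rw [if_neg hbr]
          have hi1 : i + 1 < ws.length := by omega
          have hl3 : i + 2 < (nws0 ++ ["<STOP>"]).length := by simp [hlen]; omega
          rw [trisFrom_cons' _ _ hl3, List.foldl_cons]
          have hmap3 : (setNorm freqs (setNorm freqs (setNorm freqs ws i) (i+1)) (i+2)).map (normWord freqs) = nws0 := by
            rw [map_norm_setNorm, map_norm_setNorm, map_norm_setNorm, hn]
          have hlen3 : (setNorm freqs (setNorm freqs (setNorm freqs ws i) (i+1)) (i+2)).length = ws.length := by
            rw [length_setNorm, length_setNorm, length_setNorm]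
          have hli : ∀ (j : Nat), j < ws.length →
              (nws0 ++ ["<STOP>"]).getD j "" = normWord freqs (ws.getD j "") := by
            intro j hj
            have hq : (nws0 ++ ["<STOP>"])[j]? = some (normWord freqs (ws.getD j "")) := by
              rw [List.getElem?_append_left (by omega), ← hn, List.getElem?_map,
                  List.getElem?_eq_getElem hj]
              simp [List.getD, List.getElem?_eq_getElem hj]
            simp [List.getD, hq]
          have hv0 : (setNorm freqs (setNorm freqs (setNorm freqs ws i) (i+1)) (i+2)).getD i ""
              = normWord freqs (ws.getD i "") := by
            rw [getD_setNorm_ne _ _ _ _ (by omega), getD_setNorm_ne _ _ _ _ (by omega),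
                getD_setNorm_self _ _ _ h]
          have hv1 : (setNorm freqs (setNorm freqs (setNorm freqs ws i) (i+1)) (i+2)).getD (i+1) ""
              = normWord freqs (ws.getD (i+1) "") := by
            rw [getD_setNorm_ne _ _ _ _ (by omega),
                getD_setNorm_self _ _ _ (by rw [length_setNorm]; omega),
                getD_setNorm_ne _ _ _ _ (by omega)]
          have hkey : (if (i : Int) = (ws.length : Int) - 2 then
                ((setNorm freqs (setNorm freqs (setNorm freqs ws i) (i+1)) (i+2)).getD i "",
                 (setNorm freqs (setNorm freqs (setNorm freqs ws i) (i+1)) (i+2)).getD (i+1) "", "<STOP>")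
              else
                ((setNorm freqs (setNorm freqs (setNorm freqs ws i) (i+1)) (i+2)).getD i "",
                 (setNorm freqs (setNorm freqs (setNorm freqs ws i) (i+1)) (i+2)).getD (i+1) "",
                 (setNorm freqs (setNorm freqs (setNorm freqs ws i) (i+1)) (i+2)).getD (i+2) ""))
              = ((nws0 ++ ["<STOP>"]).getD i "", (nws0 ++ ["<STOP>"]).getD (i+1) "",
                 (nws0 ++ ["<STOP>"]).getD (i+2) "") := by
            rw [hli i h, hli (i+1) hi1]
            by_cases hstop : (i : Int) = (ws.length : Int) - 2
            · have hs2 : (nws0 ++ ["<STOP>"]).getD (i+2) "" = "<STOP>" := by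
                simp [List.getD, List.getElem?_append_right (show nws0.length ≤ i + 2 by omega),
                      show i + 2 - nws0.length = 0 from by omega]
              rw [if_pos hstop, hs2, hv0, hv1]
            · have hi2 : i + 2 < ws.length := by omega
              have hv2 : (setNorm freqs (setNorm freqs (setNorm freqs ws i) (i+1)) (i+2)).getD (i+2) ""
                  = normWord freqs (ws.getD (i+2) "") := by
                rw [getD_setNorm_self _ _ _ (by rw [length_setNorm, length_setNorm]; omega),
                    getD_setNorm_ne _ _ _ _ (by omega), getD_setNorm_ne _ _ _ _ (by omega)]
              rw [if_neg hstop, hv0, hv1, hv2, hli (i+2) hi2]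
          rw [hkey, ih _ (i+1) _ (by rw [hlen3]; omega) hmap3]
      · have hlen : nws0.length = ws.length := by rw [← hn]; simp
        rw [triLoop, if_neg h]
        rw [trisFrom_eq_nil _ _ (by simp [hlen]; omega)]
        rfl

lemma trisFrom_shift (x : String) (l : List String) :
    trisFrom (x :: l) 1 = trisFrom l 0 := by
  simp [trisFrom]

-- B's recursion computes exactly the sliding window over the normalized, STOP-terminated list
lemma trisB_eq_trisFrom (freqs : List (String × Int)) (ws : List String) :
    trisB freqs ws = trisFrom (ws.map (normWord freqs) ++ ["<STOP>"]) 0 := by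
  induction ws with
  | nil => rfl
  | cons a tail ih =>
    cases tail with
    | nil => rfl
    | cons b tail2 =>
      cases tail2 with
      | nil => rfl
      | cons c rest =>
        have h3 : 0 + 2 < (((a :: b :: c :: rest).map (normWord freqs)) ++ ["<STOP>"]).length := by
          simp
        rw [trisB, trisFrom_cons _ _ h3, ih]
        simp
        rw [trisFrom_shift]

lemma foldl_flatMap_count (g : PySem.Dict (String × String × String) Int → (String × String × String)
      → PySem.Dict (String × String × String) Int)
    (f : String → List (String × String × String)) :
    ∀ (l : List String) (d : PySem.Dict (String × String × String) Int),
      (l.flatMap f).foldl g d = l.foldl (fun acc s => (f s).foldl g acc) d := by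
  intro l
  induction l with
  | nil => intro d; rfl
  | cons x xs ih => intro d; rw [List.flatMap_cons, List.foldl_append, List.foldl_cons, ih]

-- the final dict of a fold inserting a key-determined value, as items
lemma items_foldl_insert_keyed (f : String × String × String → Int) :
    ∀ (l : List (String × String × String)),
      (l.foldl (fun d t => d.insert t (f t)) PySem.Dict.empty).items
        = (PySem.Set.ofList l).map (fun k => (k, f k)) := by
  intro l
  induction l using List.reverseRecOn with
  | nil => rfl
  | append_singleton l x ih =>
    rw [List.foldl_append, List.foldl_cons, List.foldl_nil]
    have hkeys : (l.foldl (fun d t => d.insert t (f t)) PySem.Dict.empty).keys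
        = PySem.Set.ofList l := by
      rw [PySem.Dict.keys_foldl_insert]
      simp [PySem.Set.update_nil_left]
    by_cases hx : x ∈ l
    · have hc : (l.foldl (fun d t => d.insert t (f t)) PySem.Dict.empty).contains x = true := by
        rw [PySem.Dict.contains_eq_decide_mem_keys, hkeys]
        simp [PySem.Set.mem_ofList, hx]
      rw [PySem.Dict.items_insert_of_contains _ _ hc, ih]
      have hof : PySem.Set.ofList (l ++ [x]) = PySem.Set.ofList l := by
        simp [PySem.Set.ofList_append_singleton, PySem.Set.add, PySem.Set.contains,
              PySem.Set.mem_ofList, hx]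
      rw [hof, List.map_map]
      refine List.map_congr_left ?_
      intro k _
      by_cases hk : k = x
      · subst hk; simp
      · simp [Function.comp, hk]
    · have hc : (l.foldl (fun d t => d.insert t (f t)) PySem.Dict.empty).contains x = false := by
        rw [PySem.Dict.contains_eq_decide_mem_keys, hkeys]
        simp [PySem.Set.mem_ofList, hx]
      rw [PySem.Dict.items_insert_of_not_contains _ _ hc, ih]
      have hof : PySem.Set.ofList (l ++ [x]) = PySem.Set.ofList l ++ [x] := by
        simp [PySem.Set.ofList_append_singleton, PySem.Set.add, PySem.Set.contains,
              PySem.Set.mem_ofList, hx]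
      rw [hof, List.map_append]
      rfl

-- A's accumulated dict is Counter(stream)
lemma foldl_countTri_eq_counter (l : List (String × String × String)) :
    l.foldl countTri PySem.Dict.empty = PySem.Dict.counter l := by
  rw [← PySem.Dict.foldl_insert_getD_add_one_eq_counter]
  rfl

-- ===== VERDICT (by name: the statement is the Claim_ definition above) =====
theorem get_tri_count_spec : Claim_equal_get_tri_count := by
  intro data freqs _
  unfold Spec_get_tri_count get_tri_count get_tri_count_alt
  have hfun : (fun (tc : PySem.Dict (String × String × String) Int) (sentence : String) =>
                triLoop freqs (PySem.Str.split₀ sentence).length (PySem.Str.split₀ sentence) 0 tc)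
            = (fun (tc : PySem.Dict (String × String × String) Int) (sentence : String) =>
                (trisB freqs (PySem.Str.split₀ sentence)).foldl countTri tc) := by
    funext tc s
    rw [triLoop_eq_trisFrom freqs ((PySem.Str.split₀ s).map (normWord freqs))
          (PySem.Str.split₀ s).length (PySem.Str.split₀ s) 0 tc (by omega) rfl,
        trisB_eq_trisFrom]
  rw [hfun]
  rw [← foldl_flatMap_count countTri (fun s => trisB freqs (PySem.Str.split₀ s)) data PySem.Dict.empty]
  unfold itemsFlat
  congr 1
  rw [foldl_countTri_eq_counter, PySem.Dict.items_counter,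
      items_foldl_insert_keyed (fun t =>
        ((data.flatMap (fun sentence => trisB freqs (PySem.Str.split₀ sentence))).count t : Int))]
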